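-- pv_equiv track=rewrite | github.com/Wchoi189/mlops-cloud-project-mlops_11 | src/data_processing/scheduler.py | _analyze_release_year_distribution
-- ===== SOURCE A (Python) =====
-- def _analyze_release_year_distribution(movies):
--     """출시연도 분포 분석"""
--     year_counts = {}
--
--     for movie in movies:
--         release_date = movie.get('release_date', '')
--         if release_date and len(release_date) >= 4:
--             year = release_date[:4]
--             year_counts[year] = year_counts.get(year, 0) + 1
--
--     return dict(sorted(year_counts.items(), reverse=True))
-- ===== SOURCE B (Python) =====
-- def _analyze_release_year_distribution(movies):
--     """Sort the full multiset of valid 4-char year prefixes descending, then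
--     run-length encode the sorted list with a two-index while loop."""
--     years = sorted(
--         (movie.get('release_date', '')[:4] for movie in movies
--          if movie.get('release_date', '') and len(movie.get('release_date', '')) >= 4),
--         reverse=True)
--     result = {}
--     i, n = 0, len(years)
--     while i < n:
--         j = i + 1
--         while j < n and years[j] == years[i]:
--             j += 1
--         result[years[i]] = j - i
--         i = j
--     return result
-- ===== Notes on version B (the rewrite author's own statement) =====
-- stated objective: alternative
-- what changed: A maintains an incrementally-updated counter dict while scanning movies and sorts its (year, count) items at the end; B never builds a counter: it sorts the whole multiset of valid 4-char year prefixes descending and run-length encodes the sorted list with a two-index while loop, emitting each run's length as the count.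
import Mathlib
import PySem

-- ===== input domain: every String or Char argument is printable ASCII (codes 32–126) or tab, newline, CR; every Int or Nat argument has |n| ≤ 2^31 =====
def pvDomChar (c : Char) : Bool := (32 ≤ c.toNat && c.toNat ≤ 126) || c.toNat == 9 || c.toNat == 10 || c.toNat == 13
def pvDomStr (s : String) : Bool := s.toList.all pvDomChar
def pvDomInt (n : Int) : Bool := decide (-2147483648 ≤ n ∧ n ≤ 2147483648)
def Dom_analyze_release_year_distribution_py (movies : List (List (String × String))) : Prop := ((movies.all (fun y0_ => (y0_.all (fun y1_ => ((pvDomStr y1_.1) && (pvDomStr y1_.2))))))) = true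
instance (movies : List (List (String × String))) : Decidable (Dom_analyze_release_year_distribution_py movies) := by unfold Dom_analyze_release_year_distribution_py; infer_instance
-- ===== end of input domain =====

-- B replaces A's incrementally-updated counter dict by sorting the whole multiset of
-- valid 4-char year prefixes descending and run-length encoding the sorted list
-- (objective: alternative algorithm; not claimed faster).

-- ===== PORT A =====
-- Port note: Python sorts the (year, count) pairs as tuples; the dict's keys are
-- distinct, so sorting by the first component is exact.
def analyze_release_year_distribution_py (movies : List (List (String × String))) : List (String × Int) :=
  let year_counts : PySem.Dict String Int :=
    movies.foldl (fun year_counts movie =>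
      let release_date := (PySem.Dict.mk movie).getD "release_date" ""
      if release_date ≠ "" ∧ 4 ≤ PySem.Str.len release_date then
        let year := PySem.Str.slice release_date none (some 4)
        year_counts.insert year (year_counts.getD year 0 + 1)
      else year_counts) PySem.Dict.empty
  PySem.List.sorted year_counts.items (fun p => p.1) true

-- ===== PORT B =====
-- B's run-length loop: the outer while-loop emits one (year, run length) pair per
-- run; the inner `while years[j] == years[i]` advance is the takeWhile, the jump
-- `i = j` the dropWhile.
def pvRuns : List String → List (String × Int)
  | [] => []
  | y :: rest =>
      (y, 1 + ((rest.takeWhile (fun z => z == y)).length : Int)) ::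
        pvRuns (rest.dropWhile (fun z => z == y))
  termination_by s => s.length
  decreasing_by
    simp only [List.length_cons]
    exact Nat.lt_succ_of_le (List.length_dropWhile_le _ _)

-- B's generator expression: filter the movies with a valid release_date, map to the 4-char prefix
def pvYearsB (movies : List (List (String × String))) : List String :=
  (movies.filter (fun movie =>
      let release_date := (PySem.Dict.mk movie).getD "release_date" ""
      decide (release_date ≠ "" ∧ 4 ≤ PySem.Str.len release_date))).map
    (fun movie => PySem.Str.slice ((PySem.Dict.mk movie).getD "release_date" "") none (some 4))

def analyze_release_year_distribution_py_alt (movies : List (List (String × String))) : List (String × Int) :=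
  pvRuns (PySem.List.sorted (pvYearsB movies) (fun y => y) true)

-- ===== PRECONDITION & SPEC =====
def Spec_analyze_release_year_distribution_py (movies : List (List (String × String))) (out : List (String × Int)) : Prop := out = analyze_release_year_distribution_py_alt movies
instance (movies : List (List (String × String))) (out : List (String × Int)) : Decidable (Spec_analyze_release_year_distribution_py movies out) := by unfold Spec_analyze_release_year_distribution_py; infer_instance

-- ===== CLAIM (what is proved, stated in full; the proofs are below) =====
def Claim_equal_analyze_release_year_distribution_py : Prop := ∀ (movies : List (List (String × String))), Dom_analyze_release_year_distribution_py movies → Spec_analyze_release_year_distribution_py movies (analyze_release_year_distribution_py movies)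

-- ===== LEMMAS AND PROOFS =====

-- the per-movie counter step of port A, named for the proofs
def pvStep (d : PySem.Dict String Int) (movie : List (String × String)) : PySem.Dict String Int :=
  let release_date := (PySem.Dict.mk movie).getD "release_date" ""
  if release_date ≠ "" ∧ 4 ≤ PySem.Str.len release_date then
    let year := PySem.Str.slice release_date none (some 4)
    d.insert year (d.getD year 0 + 1)
  else d

-- A's counter fold counts exactly B's collected year list
lemma pvFold_eq (movies : List (List (String × String))) (d : PySem.Dict String Int) :
    movies.foldl pvStep d
      = (pvYearsB movies).foldl (fun d y => d.insert y (d.getD y 0 + 1)) d := by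
  induction movies generalizing d with
  | nil => simp [pvYearsB]
  | cons m ms ih =>
      rw [List.foldl_cons, ih]
      unfold pvStep pvYearsB
      by_cases h : (PySem.Dict.mk m).getD "release_date" "" ≠ "" ∧
          4 ≤ PySem.Str.len ((PySem.Dict.mk m).getD "release_date" "")
      · rw [if_pos h, List.filter_cons_of_pos (by simpa using h), List.map_cons,
          List.foldl_cons]
      · rw [if_neg h, List.filter_cons_of_neg (by simpa using h)]

-- the first element surviving dropWhile fails the predicate
lemma dropWhile_head_false {α : Type} (p : α → Bool) (l : List α) (x : α) (xs : List α)
    (h : l.dropWhile p = x :: xs) : p x = false := by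
  induction l with
  | nil => simp [List.dropWhile] at h
  | cons a t ih =>
      by_cases hp : p a
      · exact ih (by simpa [List.dropWhile, hp] using h)
      · rw [List.dropWhile_cons_of_neg (by simpa using hp)] at h
        cases h; simpa using hp

-- run-length encoding of a descending-sorted list: membership characterisation and
-- strictly decreasing keys, proved together by structural induction along pvRuns
lemma pvRuns_main (s : List String) (h : s.Pairwise (fun a b => b ≤ a)) :
    (∀ p : String × Int, p ∈ pvRuns s ↔ p.1 ∈ s ∧ p.2 = (s.count p.1 : Int)) ∧
    (pvRuns s).Pairwise (fun p q => q.1 < p.1) := by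
  induction s using pvRuns.induct with
  | case1 => simp [pvRuns]
  | case2 y rest ih =>
      set t := rest.takeWhile (fun z => z == y) with ht
      set d := rest.dropWhile (fun z => z == y) with hd
      have hsplit : rest = t ++ d := (List.takeWhile_append_dropWhile).symm
      have htall : ∀ z ∈ t, z = y := by
        intro z hz
        have := List.mem_takeWhile_imp hz
        simpa using this
      have hrest_le : ∀ z ∈ rest, z ≤ y := by
        intro z hz; exact (List.pairwise_cons.mp h).1 z hz
      have hd_pw : d.Pairwise (fun a b => b ≤ a) :=
        List.Pairwise.sublist (List.dropWhile_sublist (fun z => z == y))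
          ((List.pairwise_cons.mp h).2)
      have hy_not_d : y ∉ d := by
        intro hyd
        cases hdc : d with
        | nil => simp [hdc] at hyd
        | cons h0 d' =>
            have hph : (h0 == y) = false :=
              dropWhile_head_false (fun z => z == y) rest h0 d' (hd.symm.trans hdc)
            have hne : h0 ≠ y := by simpa using hph
            have h0y : h0 ≤ y := hrest_le h0 (by rw [hsplit, hdc]; simp)
            have : y ≤ h0 := by
              rw [hdc] at hyd hd_pw
              rcases List.mem_cons.mp hyd with he | hm
              · exact le_of_eq he
              · exact (List.pairwise_cons.mp hd_pw).1 y hm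
            exact hne (le_antisymm h0y this)
      have hcount_y : ((y :: rest).count y : Int) = 1 + (t.length : Int) := by
        have h1 : t.count y = t.length := List.count_eq_length.mpr (by
          intro b hb; exact (htall b hb).symm)
        have h2 : d.count y = 0 := List.count_eq_zero.mpr hy_not_d
        rw [hsplit]
        simp [h1, h2]
        ring
      have hcount_ne : ∀ k : String, k ≠ y → (y :: rest).count k = d.count k := by
        intro k hk
        have h1 : t.count k = 0 := List.count_eq_zero.mpr (by
          intro hkt; exact hk (htall k hkt))
        rw [hsplit]
        simp [h1, Ne.symm hk]
      obtain ⟨ihmem, ihpw⟩ := ih hd_pw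
      constructor
      · intro p
        rw [pvRuns, ← hd, ← ht]
        rw [List.mem_cons]
        constructor
        · rintro (he | hmem)
          · subst he
            exact ⟨List.mem_cons_self, hcount_y.symm⟩
          · obtain ⟨hm, hc⟩ := (ihmem p).mp hmem
            refine ⟨List.mem_cons_of_mem _ (by rw [hsplit]; exact List.mem_append_right _ hm), ?_⟩
            rw [hc]
            have : p.1 ≠ y := fun he => hy_not_d (he ▸ hm)
            rw [hcount_ne p.1 this]
        · rintro ⟨hm, hc⟩
          by_cases hpy : p.1 = y
          · left
            have : p.2 = 1 + (t.length : Int) := by rw [hc, hpy, hcount_y]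
            exact Prod.ext hpy this
          · right
            have hmr : p.1 ∈ rest := by
              rcases List.mem_cons.mp hm with he | hm'
              · exact absurd he hpy
              · exact hm'
            have hmd : p.1 ∈ d := by
              rw [hsplit] at hmr
              rcases List.mem_append.mp hmr with hmt | hmd
              · exact absurd (htall _ hmt) hpy
              · exact hmd
            exact (ihmem p).mpr ⟨hmd, by rw [hc, hcount_ne p.1 hpy]⟩
      · rw [pvRuns, ← hd, ← ht]
        refine List.pairwise_cons.mpr ⟨?_, ihpw⟩
        intro q hq
        have hqd : q.1 ∈ d := ((ihmem q).mp hq).1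
        have hle : q.1 ≤ y := hrest_le q.1 (by rw [hsplit]; exact List.mem_append_right _ hqd)
        show q.1 < y
        exact lt_of_le_of_ne hle (fun he => hy_not_d (he ▸ hqd))

-- ===== VERDICT (by name: the statement is the Claim_ definition above) =====
theorem analyze_release_year_distribution_py_spec : Claim_equal_analyze_release_year_distribution_py := by
  intro movies _
  show analyze_release_year_distribution_py movies = analyze_release_year_distribution_py_alt movies
  unfold analyze_release_year_distribution_py analyze_release_year_distribution_py_alt
  set ys := pvYearsB movies with hys
  have hfold : movies.foldl pvStep PySem.Dict.empty = PySem.Dict.counter ys := by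
    rw [pvFold_eq]
    exact PySem.Dict.foldl_insert_getD_add_one_eq_counter ys
  show PySem.List.sorted (movies.foldl pvStep PySem.Dict.empty).items (fun p => p.1) true = _
  rw [hfold, PySem.Dict.items_counter]
  set s := PySem.List.sorted ys (fun y => y) true with hs
  have hspw : s.Pairwise (fun a b => b ≤ a) := PySem.List.sorted_pairwise_rev ys (fun y => y)
  obtain ⟨hmem, hpw⟩ := pvRuns_main s hspw
  have hsperm : s.Perm ys := PySem.List.sorted_perm ys (fun y => y) true
  have hnd1 : (pvRuns s).Nodup := hpw.imp (fun {a b} hlt he => absurd (congrArg Prod.fst he) (by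
    intro h1; exact absurd h1.symm (ne_of_lt hlt)))
  have hnd2 : ((PySem.Set.ofList ys).map (fun k => (k, (ys.count k : Int)))).Nodup :=
    (PySem.Set.nodup_ofList ys).map (fun a b h => congrArg Prod.fst h)
  have hperm : (pvRuns s).Perm ((PySem.Set.ofList ys).map (fun k => (k, (ys.count k : Int)))) := by
    rw [List.perm_ext_iff_of_nodup hnd1 hnd2]
    intro p
    rw [hmem p]
    constructor
    · rintro ⟨hm, hc⟩
      refine List.mem_map.mpr ⟨p.1, ?_, ?_⟩
      · exact (PySem.Set.mem_ofList _ _).mpr (hsperm.mem_iff.mp hm)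
      · rw [← hsperm.count_eq p.1, ← hc]
    · intro hm
      obtain ⟨k, hk, he⟩ := List.mem_map.mp hm
      have h1 : p.1 = k := (congrArg Prod.fst he).symm
      refine ⟨hsperm.mem_iff.mpr (h1 ▸ (PySem.Set.mem_ofList _ _).mp hk), ?_⟩
      rw [hsperm.count_eq p.1, h1, ← congrArg Prod.snd he]
  exact PySem.List.sorted_rev_eq_of_perm_of_pairwise_gt _ _ (fun p => p.1) hperm hpw
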